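-- pv_equiv track=rewrite | github.com/MarketSquare/robotframework-robocop | src/robocop/formatter/formatters/RenameTestCases.py | cap_string_until_succeed
-- ===== SOURCE A (Python) =====
-- IGNORE_CHARS = {"(", "[", "{", "!", "?"}
--
-- def cap_string_until_succeed(word: str):
--     """Yield characters from the word and capitalize character until we are able to make char uppercase."""
--     capitalize = True
--     for char in word:
--         if capitalize:
--             # chars like numbers, -, dots, commas etc. will not change case, and we should not capitalize further
--             if char == char.upper() and char not in IGNORE_CHARS:
--                 capitalize = False
--             else:
--                 char = char.upper()
--                 capitalize = not char.isupper()
--         yield char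
-- ===== SOURCE B (Python) =====
-- IGNORE_CHARS = {"(", "[", "{", "!", "?"}
--
-- def cap_string_until_succeed(word: str):
--     """Three-phase generator: pass leading IGNORE_CHARS through, upper-case one pivot char, pass the tail through."""
--     i = 0
--     n = len(word)
--     while i < n and word[i] in IGNORE_CHARS:
--         yield word[i]
--         i += 1
--     if i < n:
--         yield word[i].upper()
--         i += 1
--     while i < n:
--         yield word[i]
--         i += 1
-- ===== Notes on version B (the rewrite author's own statement) =====
-- stated objective: simpler
-- what changed: Replaces the per-character capitalize-flag state machine with an index-based three-phase generator: a while-loop passing leading IGNORE_CHARS through, one yield of the upper-cased pivot character, and a final while-loop passing the tail through unchanged.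
import Mathlib
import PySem

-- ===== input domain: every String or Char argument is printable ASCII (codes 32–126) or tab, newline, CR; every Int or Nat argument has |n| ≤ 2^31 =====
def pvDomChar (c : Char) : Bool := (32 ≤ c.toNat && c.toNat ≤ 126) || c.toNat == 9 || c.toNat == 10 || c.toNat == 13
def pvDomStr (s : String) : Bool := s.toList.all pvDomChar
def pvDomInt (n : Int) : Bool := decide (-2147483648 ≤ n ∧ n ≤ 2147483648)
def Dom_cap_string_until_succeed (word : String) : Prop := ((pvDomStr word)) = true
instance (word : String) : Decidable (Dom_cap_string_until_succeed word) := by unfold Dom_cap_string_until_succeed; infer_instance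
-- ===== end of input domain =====

-- B replaces A's capitalize-flag state machine with a three-phase scan (leading IGNORE_CHARS, one upper-cased pivot, unchanged tail); objective: simpler.
-- A is a generator; both ports return the list of yielded one-character strings.
-- char.upper() on a single char is ported as PySem.Chars.upperChar (exact on the ASCII domain).

-- ===== PORT A =====
def pvIgnoreChars : List Char := ['(', '[', '{', '!', '?']

-- the for-loop over the word with the `capitalize` flag as state
def capALoop : Bool → List Char → List String
  | _, [] => []
  | capitalize, char :: rest =>
    if capitalize then
      if char == PySem.Chars.upperChar char && !(pvIgnoreChars.contains char) then
        String.ofList [char] :: capALoop false rest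
      else
        let char' := PySem.Chars.upperChar char
        String.ofList [char'] :: capALoop (!PySem.Chars.isupper char') rest
    else
      String.ofList [char] :: capALoop capitalize rest

def cap_string_until_succeed (word : String) : List String :=
  capALoop true word.toList

-- ===== PORT B =====
-- phase 3: final while-loop, yield every remaining character unchanged
def capBTail : List Char → List String
  | [] => []
  | c :: rest => String.ofList [c] :: capBTail rest

-- phase 2: if i is still in range, yield word[i].upper() as the single pivot
def capBPivot : List Char → List String
  | [] => []
  | c :: rest => PySem.Str.upper (String.ofList [c]) :: capBTail rest

-- phase 1: first while-loop, yield leading characters while they are in IGNORE_CHARS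
def capBSkip : List Char → List String
  | [] => []
  | c :: rest =>
    if pvIgnoreChars.contains c then String.ofList [c] :: capBSkip rest
    else capBPivot (c :: rest)

def cap_string_until_succeed_alt (word : String) : List String :=
  capBSkip word.toList

-- ===== PRECONDITION & SPEC =====
def Spec_cap_string_until_succeed (word : String) (out : List String) : Prop := out = cap_string_until_succeed_alt word
instance (word : String) (out : List String) : Decidable (Spec_cap_string_until_succeed word out) := by unfold Spec_cap_string_until_succeed; infer_instance

-- ===== CLAIM (what is proved, stated in full; the proofs are below) =====
def Claim_equal_cap_string_until_succeed : Prop := ∀ (word : String), Dom_cap_string_until_succeed word → Spec_cap_string_until_succeed word (cap_string_until_succeed word)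

-- ===== LEMMAS AND PROOFS =====

-- a lowercase char changes under upperChar
theorem upperChar_ne_of_islower (c : Char) (h : PySem.Chars.islower c = true) :
    PySem.Chars.upperChar c ≠ c := by
  simp [PySem.Chars.islower] at h
  obtain ⟨h1, h2⟩ := h
  have hn1 : 97 ≤ c.toNat := h1
  have hn2 : c.toNat ≤ 122 := h2
  simp [PySem.Chars.upperChar, PySem.Chars.islower, h1, h2]
  intro he
  have h3 := congrArg Char.toNat he
  rw [Char.toNat_ofNat] at h3
  have hv : (c.toNat - 32).isValidChar := by unfold Nat.isValidChar; omega
  simp [hv] at h3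
  omega

theorem upper_singleton (c : Char) :
    PySem.Str.upper (String.ofList [c]) = String.ofList [PySem.Chars.upperChar c] := by
  simp [PySem.Str.upper, PySem.Chars.upper]

-- the result of upperChar on a lowercase char is an uppercase letter
theorem isupper_upperChar_of_islower (c : Char) (h : PySem.Chars.islower c = true) :
    PySem.Chars.isupper (PySem.Chars.upperChar c) = true := by
  simp [PySem.Chars.islower] at h
  obtain ⟨h1, h2⟩ := h
  have hn1 : 97 ≤ c.toNat := h1
  have hn2 : c.toNat ≤ 122 := h2
  have hv : (c.toNat - 32).isValidChar := by unfold Nat.isValidChar; omega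
  have ht : (Char.ofNat (c.toNat - 32)).toNat = c.toNat - 32 := by
    rw [Char.toNat_ofNat]; simp [hv]
  simp [PySem.Chars.upperChar, PySem.Chars.islower, h1, h2, PySem.Chars.isupper, Char.le_def]
  constructor
  · show 65 ≤ (Char.ofNat (c.toNat - 32)).toNat
    omega
  · show (Char.ofNat (c.toNat - 32)).toNat ≤ 90
    omega

-- once the flag is False, A yields the rest unchanged = B's tail phase
theorem capALoop_false (l : List Char) : capALoop false l = capBTail l := by
  induction l with
  | nil => rfl
  | cons c rest ih => simp [capALoop, capBTail, ih]

theorem capALoop_true (l : List Char) : capALoop true l = capBSkip l := by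
  induction l with
  | nil => rfl
  | cons c rest ih =>
    by_cases hmem : c ∈ pvIgnoreChars
    · -- c is one of the five ignore chars: A keeps the flag, B skips
      have hcase : c = '(' ∨ c = '[' ∨ c = '{' ∨ c = '!' ∨ c = '?' := by
        simpa [pvIgnoreChars] using hmem
      have hnl : PySem.Chars.islower c = false := by
        rcases hcase with h | h | h | h | h <;> subst h <;> decide
      have hup : PySem.Chars.upperChar c = c := by
        simp [PySem.Chars.upperChar, hnl]
      have hiu : PySem.Chars.isupper c = false := by
        rcases hcase with h | h | h | h | h <;> subst h <;> decide
      simp [capALoop, capBSkip, hmem, hup, hiu, ih]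
    · -- pivot: first non-ignore char
      by_cases hl : PySem.Chars.islower c = true
      · have hne : PySem.Chars.upperChar c ≠ c := upperChar_ne_of_islower c hl
        have hiu := isupper_upperChar_of_islower c hl
        simp [capALoop, capBSkip, capBPivot, hmem, Ne.symm hne, hiu,
              capALoop_false, upper_singleton]
      · have hnl : PySem.Chars.islower c = false := by simpa using hl
        have hup : PySem.Chars.upperChar c = c := by
          simp [PySem.Chars.upperChar, hnl]
        simp [capALoop, capBSkip, capBPivot, hmem, hup, capALoop_false, upper_singleton]

-- ===== VERDICT (by name: the statement is the Claim_ definition above) =====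
theorem cap_string_until_succeed_spec : Claim_equal_cap_string_until_succeed := by
  intro word _
  show cap_string_until_succeed word = cap_string_until_succeed_alt word
  unfold cap_string_until_succeed cap_string_until_succeed_alt
  exact capALoop_true word.toList
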